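-- pv_equiv track=rewrite | github.com/shivam-singh-au17/Accomplish_classes- | coding-challenges/week07/day02/test.py | findLB
-- ===== SOURCE A (Python) =====
-- def findLB(A, target):
--     prev = -1
--     for i in range(len(A)):
--         if A[i] == target:
--             return i
--         elif A[i] > target:
--             return prev
--         prev = i
-- ===== SOURCE B (Python) =====
-- def findLB(A, target):
--     # Binary search for the lower bound (first index with A[i] >= target);
--     # assumes A sorted ascending.
--     lo, hi = 0, len(A)
--     while lo < hi:
--         mid = (lo + hi) // 2
--         if A[mid] < target:
--             lo = mid + 1
--         else:
--             hi = mid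
--     if lo == len(A):
--         return None
--     return lo if A[lo] == target else lo - 1
-- ===== Notes on version B (the rewrite author's own statement) =====
-- stated objective: faster
-- what changed: Replaces the linear scan for the first element >= target by a binary search (lower bound), valid under the precondition that no element >= target precedes an element < target (in particular on the sorted lists the task assumes); Pre_ excludes the non-partitioned lists, on which A's scan result reflects an ordering violation B cannot see.
-- outside the precondition, e.g. on findLB([3, 1, 2], 2): A returns -1, B returns 2
import Mathlib
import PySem

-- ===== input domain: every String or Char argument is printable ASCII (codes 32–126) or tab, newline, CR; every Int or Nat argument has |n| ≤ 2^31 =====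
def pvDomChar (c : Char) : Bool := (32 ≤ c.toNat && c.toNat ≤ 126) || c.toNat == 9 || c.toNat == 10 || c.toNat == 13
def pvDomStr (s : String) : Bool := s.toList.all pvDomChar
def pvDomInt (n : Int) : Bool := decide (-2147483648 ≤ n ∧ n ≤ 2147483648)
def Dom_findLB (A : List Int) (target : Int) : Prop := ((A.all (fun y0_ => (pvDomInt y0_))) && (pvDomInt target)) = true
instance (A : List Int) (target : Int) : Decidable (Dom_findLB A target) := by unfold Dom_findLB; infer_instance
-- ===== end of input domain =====

-- B replaces A's linear scan by a binary search for the lower bound (requires the sorted input the task assumes).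

-- ===== PORT A =====
-- the for-loop over range(len(A)) with early returns and the running `prev`
def findLBgo (A : List Int) (target : Int) (i : Nat) (prev : Int) : Option Int :=
  if i < A.length then
    if A.getD i 0 = target then some (i : Int)          -- A[i], index always in range here
    else if A.getD i 0 > target then some prev
    else findLBgo A target (i + 1) (i : Int)
  else none
termination_by A.length - i

def findLB (A : List Int) (target : Int) : Option Int :=
  findLBgo A target 0 (-1)

-- ===== PORT B =====
-- the while-loop: lower-bound binary search; indices lo ≤ mid < hi ≤ len, so A[mid] is in range
def bsearchLo (A : List Int) (target : Int) (lo hi : Nat) : Nat :=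
  if lo < hi then
    if A.getD ((lo + hi) / 2) 0 < target then bsearchLo A target ((lo + hi) / 2 + 1) hi
    else bsearchLo A target lo ((lo + hi) / 2)
  else lo
termination_by hi - lo
decreasing_by all_goals omega

def findLB_alt (A : List Int) (target : Int) : Option Int :=
  let lo := bsearchLo A target 0 A.length
  if lo = A.length then none
  else if A.getD lo 0 = target then some (lo : Int)
  else some ((lo : Int) - 1)

-- ===== PRECONDITION & SPEC =====
-- Pre_ excludes lists in which some element ≥ target precedes an element < target (A still
-- returns a value there, but such lists break the sortedness assumption of the lower-bound
-- task and B's binary search legitimately lands elsewhere than A's scan).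
def Pre_findLB (A : List Int) (target : Int) : Prop :=
  ∀ i, i < A.length → ∀ j, j < A.length → i < j → target ≤ A.getD i 0 → target ≤ A.getD j 0
instance (A : List Int) (target : Int) : Decidable (Pre_findLB A target) := by unfold Pre_findLB; infer_instance
def pvWitness_findLB : List Int × Int := ([1, 2, 2, 5], 2)

def Spec_findLB (A : List Int) (target : Int) (out : Option Int) : Prop := out = findLB_alt A target
instance (A : List Int) (target : Int) (out : Option Int) : Decidable (Spec_findLB A target out) := by unfold Spec_findLB; infer_instance

-- ===== CLAIM (what is proved, stated in full; the proofs are below) =====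
def Claim_equal_findLB : Prop := ∀ (A : List Int) (target : Int), Dom_findLB A target → Pre_findLB A target → Spec_findLB A target (findLB A target)

-- ===== LEMMAS AND PROOFS =====

theorem bsearchLo_bounds (A : List Int) (t : Int) (lo hi : Nat) (h : lo ≤ hi) :
    lo ≤ bsearchLo A t lo hi ∧ bsearchLo A t lo hi ≤ hi := by
  fun_induction bsearchLo A t lo hi with
  | case1 lo hi hlt hm ih => have := ih (by omega); constructor <;> omega
  | case2 lo hi hlt hm ih => have := ih (by omega); constructor <;> omega
  | case3 lo hi hlt => omega

theorem bsearchLo_spec (A : List Int) (t : Int) (lo hi : Nat)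
    (hp : ∀ i, i < A.length → ∀ j, j < A.length → i < j → t ≤ A.getD i 0 → t ≤ A.getD j 0)
    (hle : lo ≤ hi) (hhi : hi ≤ A.length)
    (hlow : ∀ j, j < lo → A.getD j 0 < t)
    (hup : ∀ j, hi ≤ j → j < A.length → t ≤ A.getD j 0) :
    (∀ j, j < bsearchLo A t lo hi → A.getD j 0 < t) ∧
    (bsearchLo A t lo hi < A.length → t ≤ A.getD (bsearchLo A t lo hi) 0) := by
  fun_induction bsearchLo A t lo hi with
  | case1 lo hi hlt hm ih =>
    refine ih (by omega) hhi (fun j hj => ?_) hup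
    by_contra hc
    rcases Nat.lt_or_ge j ((lo + hi) / 2) with h | h
    · exact absurd (hp j (by omega) _ (by omega) h (by omega)) (by omega)
    · have : j = (lo + hi) / 2 := by omega
      subst this; omega
  | case2 lo hi hlt hm ih =>
    refine ih (by omega) (by omega) hlow (fun j hj hjl => ?_)
    rcases Nat.lt_or_ge ((lo + hi) / 2) j with h | h
    · exact hp _ (by omega) j hjl h (by omega)
    · have : j = (lo + hi) / 2 := by omega
      subst this; omega
  | case3 lo hi hlt =>
    exact ⟨hlow, fun hl => hup _ (by omega) hl⟩

theorem findLBgo_spec (A : List Int) (t : Int) (r : Nat) (i : Nat)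
    (hir : i ≤ r) (hr : r ≤ A.length)
    (hlow : ∀ j, i ≤ j → j < r → A.getD j 0 < t)
    (hge : r < A.length → t ≤ A.getD r 0) :
    findLBgo A t i ((i : Int) - 1) =
      (if h : r < A.length then
        (if A.getD r 0 = t then some (r : Int) else some ((r : Int) - 1))
       else none) := by
  rcases Nat.lt_or_ge i r with hlt | hge2
  · have hiL : i < A.length := by omega
    have hi : A.getD i 0 < t := hlow i (le_refl _) hlt
    rw [findLBgo]
    have h1 : ¬ A.getD i 0 = t := by omega
    have h2 : ¬ A.getD i 0 > t := by omega
    simp only [hiL, if_true, h1, if_false, h2]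
    have : (i : Int) = ((i + 1 : Nat) : Int) - 1 := by push_cast; ring
    rw [this]
    exact findLBgo_spec A t r (i + 1) (by omega) hr (fun j hj => hlow j (by omega)) hge
  · have hir' : i = r := by omega
    subst hir'
    rw [findLBgo]
    by_cases hL : i < A.length
    · have ht : t ≤ A.getD i 0 := hge hL
      simp only [hL, if_true]
      by_cases he : A.getD i 0 = t
      · simp only [List.getD] at he ⊢
        simp [he]
      · have hgt : A.getD i 0 > t := by omega
        simp only [List.getD] at he hgt ⊢
        simp [he, hgt]
    · simp [hL]
termination_by r - i

-- ===== VERDICT (by name: the statement is the Claim_ definition above) =====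
theorem findLB_spec : Claim_equal_findLB := by
  intro A target _ hpre
  unfold Spec_findLB findLB
  have hb := bsearchLo_bounds A target 0 A.length (Nat.zero_le _)
  have hs := bsearchLo_spec A target 0 A.length hpre (Nat.zero_le _) (le_refl _)
      (by omega) (fun j hj hjl => by omega)
  set r := bsearchLo A target 0 A.length with hrdef
  have halt : findLB_alt A target =
      (if r = A.length then none
       else if A.getD r 0 = target then some (r : Int) else some ((r : Int) - 1)) := rfl
  rw [halt, show ((-1 : Int)) = (((0 : Nat) : Int) - 1) by simp]
  rw [findLBgo_spec A target r 0 (Nat.zero_le _) hb.2 (fun j _ hj => hs.1 j hj) hs.2]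
  by_cases hL : r < A.length
  · have : ¬ r = A.length := by omega
    simp [hL, this]
  · have : r = A.length := by omega
    simp [this]
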